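-- pv_equiv track=rewrite | github.com/Zigje9/Algorithm_study | python/4659.py | check2
-- ===== SOURCE A (Python) =====
-- aeiou = ["a", "e", "i", "o", "u"]
--
-- def check2(password):
--     left = 0
--     right = 0
--     for p in password:
--         if p in aeiou:
--             right += 1
--             left = 0
--             if right >= 3:
--                 return False
--         else:
--             right = 0
--             left += 1
--             if left >= 3:
--                 return False
--     return True
-- ===== SOURCE B (Python) =====
-- from itertools import groupby
--
-- aeiou = ["a", "e", "i", "o", "u"]
--
-- def check2(password):
--     return all(sum(1 for _ in g) < 3
--                for _, g in groupby(password, key=lambda c: c in aeiou))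
-- ===== Notes on version B (the rewrite author's own statement) =====
-- stated objective: idiomatic
-- what changed: Replaced the two running counters with manual resets and early returns by itertools.groupby run-grouping on a vowel/consonant key plus a per-run length check.
import Mathlib
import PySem

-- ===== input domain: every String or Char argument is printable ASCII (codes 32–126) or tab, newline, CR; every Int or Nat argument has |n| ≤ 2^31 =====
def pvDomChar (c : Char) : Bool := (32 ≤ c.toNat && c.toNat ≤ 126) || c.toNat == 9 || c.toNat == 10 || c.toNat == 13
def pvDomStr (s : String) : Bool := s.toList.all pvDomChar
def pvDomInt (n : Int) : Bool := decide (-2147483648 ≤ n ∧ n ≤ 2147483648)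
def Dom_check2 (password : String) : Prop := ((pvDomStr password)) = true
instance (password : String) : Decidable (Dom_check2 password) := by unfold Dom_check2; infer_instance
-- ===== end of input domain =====

-- B replaces A's two running counters with manual resets and early returns by
-- groupby-style run-grouping on a vowel/consonant key plus a per-run length check
-- (idiomatic; same O(n) cost).

-- ===== PORT A =====
def pvVowels : List Char := ['a', 'e', 'i', 'o', 'u']

-- 'p in aeiou'
def pvIsVowel (c : Char) : Bool := decide (c ∈ pvVowels)

def check2Loop : List Char → Int → Int → Bool
  | [], _, _ => true
  | p :: rest, left, right =>
    if pvIsVowel p then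
      let right' := right + 1
      if right' ≥ 3 then false else check2Loop rest 0 right'
    else
      let left' := left + 1
      if left' ≥ 3 then false else check2Loop rest left' 0

def check2 (password : String) : Bool := check2Loop password.toList 0 0

-- ===== PORT B =====
-- groupby(password, key = c in aeiou): fold keeping the current (key, run length) at
-- the head; a changed key starts a new run. Then every run length must be < 3.
def pvStep (acc : List (Bool × Nat)) (c : Char) : List (Bool × Nat) :=
  match acc with
  | (k', n) :: rest =>
      if pvIsVowel c = k' then (k', n + 1) :: rest else (pvIsVowel c, 1) :: (k', n) :: rest
  | [] => [(pvIsVowel c, 1)]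

def check2_alt (password : String) : Bool :=
  (password.toList.foldl pvStep []).all (fun p => p.2 < 3)

-- ===== PRECONDITION & SPEC =====
def Spec_check2 (password : String) (out : Bool) : Prop := out = check2_alt password
instance (password : String) (out : Bool) : Decidable (Spec_check2 password out) := by unfold Spec_check2; infer_instance

-- ===== CLAIM (what is proved, stated in full; the proofs are below) =====
def Claim_equal_check2 : Prop := ∀ (password : String), Dom_check2 password → Spec_check2 password (check2 password)

-- ===== LEMMAS AND PROOFS =====
def pvAllOk (acc : List (Bool × Nat)) : Bool := acc.all (fun p => p.2 < 3)

theorem pvAllOk_step (acc : List (Bool × Nat)) (c : Char)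
    (h : pvAllOk (pvStep acc c) = true) : pvAllOk acc = true := by
  cases acc with
  | nil => simp [pvAllOk]
  | cons hd tl =>
    obtain ⟨k', n⟩ := hd
    by_cases hk : pvIsVowel c = k' <;>
      simp [pvStep, hk, pvAllOk] at h ⊢ <;>
      exact ⟨by omega, h.2⟩

theorem pvAllOk_foldl (l : List Char) (acc : List (Bool × Nat))
    (h : pvAllOk (l.foldl pvStep acc) = true) : pvAllOk acc = true := by
  induction l generalizing acc with
  | nil => simpa using h
  | cons c l ih => exact pvAllOk_step _ _ (ih _ (by simpa using h))

theorem pvLoop_eq (l : List Char) : ∀ (k : Bool) (n : Nat) (rest : List (Bool × Nat)),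
    n < 3 → pvAllOk rest = true →
    check2Loop l (if k then 0 else (n : Int)) (if k then (n : Int) else 0)
      = pvAllOk (l.foldl pvStep ((k, n) :: rest)) := by
  induction l with
  | nil =>
    intro k n rest hn hrest
    simp only [check2Loop, List.foldl, pvAllOk, List.all_cons] at *
    simp [hn, hrest]
  | cons c l ih =>
    intro k n rest hn hrest
    by_cases hk : pvIsVowel c = k
    · -- same key: run extends
      by_cases h3 : n + 1 ≥ 3
      · -- A returns false; B's run reaches length ≥ 3 and stays ≥ 3
        have hB : pvAllOk ((c :: l).foldl pvStep ((k, n) :: rest)) = false := by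
          apply Bool.eq_false_iff.mpr
          intro hcontra
          have := pvAllOk_foldl l _ (by simpa [List.foldl, pvStep, hk] using hcontra)
          simp [pvAllOk] at this
          omega
        cases k with
        | true =>
          have hA : check2Loop (c :: l) 0 (n : Int) = false := by
            simp only [check2Loop, hk, if_pos]
            have : ((n : Int) + 1 ≥ 3) := by omega
            simp [this]
          simpa using hA.trans hB.symm
        | false =>
          have hA : check2Loop (c :: l) (n : Int) 0 = false := by
            simp only [check2Loop, hk, Bool.false_eq_true, if_false]
            have : ((n : Int) + 1 ≥ 3) := by omega
            simp [this]
          simpa using hA.trans hB.symm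
      · have hrec := ih k (n + 1) rest (by omega) hrest
        have hRHS : ((c :: l).foldl pvStep ((k, n) :: rest)) = l.foldl pvStep ((k, n + 1) :: rest) := by
          simp [List.foldl, pvStep, hk]
        have hlt : ¬ ((n : Int) + 1 ≥ 3) := by omega
        cases k with
        | true =>
          have hA : check2Loop (c :: l) 0 (n : Int) = check2Loop l 0 ((n : Int) + 1) := by
            simp [check2Loop, hk, hlt]
          rw [hRHS] at *
          simpa [Nat.cast_add] using hA.trans (by simpa using hrec)
        | false =>
          have hA : check2Loop (c :: l) (n : Int) 0 = check2Loop l ((n : Int) + 1) 0 := by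
            simp [check2Loop, hk, hlt]
          rw [hRHS] at *
          simpa [Nat.cast_add] using hA.trans (by simpa using hrec)
    · -- key changes: a new run of length 1 starts
      have hrest' : pvAllOk ((k, n) :: rest) = true := by
        simp [pvAllOk] at hrest ⊢; exact ⟨hn, hrest⟩
      have hrec := ih (pvIsVowel c) 1 ((k, n) :: rest) (by omega) hrest'
      have hRHS : ((c :: l).foldl pvStep ((k, n) :: rest))
          = l.foldl pvStep ((pvIsVowel c, 1) :: (k, n) :: rest) := by
        simp [List.foldl, pvStep, hk]
      cases k with
      | true =>
        have hkc : pvIsVowel c = false := by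
          cases h : pvIsVowel c <;> simp_all
        have hA : check2Loop (c :: l) 0 (n : Int) = check2Loop l 1 0 := by
          simp [check2Loop, hkc]
        rw [hRHS]
        exact hA.trans (by simpa [hkc] using hrec)
      | false =>
        have hkc : pvIsVowel c = true := by
          cases h : pvIsVowel c <;> simp_all
        have hA : check2Loop (c :: l) (n : Int) 0 = check2Loop l 0 1 := by
          simp [check2Loop, hkc]
        rw [hRHS]
        exact hA.trans (by simpa [hkc] using hrec)

theorem pvMain (l : List Char) : check2Loop l 0 0 = pvAllOk (l.foldl pvStep []) := by
  cases l with
  | nil => simp [check2Loop, pvAllOk]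
  | cons c l =>
    have hRHS : ((c :: l).foldl pvStep []) = l.foldl pvStep [(pvIsVowel c, 1)] := by
      simp [List.foldl, pvStep]
    rw [hRHS]
    by_cases hk : pvIsVowel c = true
    · have := pvLoop_eq l true 1 [] (by omega) (by simp [pvAllOk])
      have hA : check2Loop (c :: l) 0 0 = check2Loop l 0 1 := by
        simp [check2Loop, hk]
      rw [hk]
      exact hA.trans (by simpa using this)
    · have hk' : pvIsVowel c = false := by simpa using hk
      have := pvLoop_eq l false 1 [] (by omega) (by simp [pvAllOk])
      have hA : check2Loop (c :: l) 0 0 = check2Loop l 1 0 := by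
        simp [check2Loop, hk']
      rw [hk']
      exact hA.trans (by simpa using this)

-- ===== VERDICT (by name: the statement is the Claim_ definition above) =====
theorem check2_spec : Claim_equal_check2 := by
  intro password _
  unfold Spec_check2 check2 check2_alt
  exact pvMain password.toList
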